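-- pv_equiv track=rewrite | github.com/bigpianist/commitbasedtest | python/musiclib/harmonypitch/chord.py | fromCodeToPitchSet
-- ===== SOURCE A (Python) =====
-- MAJORDTHIRD = 4
--
-- MINORTHIRD = 3
--
-- def fromCodeToPitchSet(code, tonic=0, octave=0):
--     """Converts a chord code into a pitch set
--
--     Args:
--         code (str): Chord code
--         tonic (int):
--         octave (int):
--
--     Returns:
--         pitchSet (list): List of pitches
--     """
--
--     pitchSet = []
--
--     # step through code to derive pitch classes
--     for numStacked3rd, symbl in enumerate(code):
--
--         # get pitch of root
--         if numStacked3rd == 0: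
--             pitch = int(symbl, 12)
--             # shift to correct tonic and octave
--             pitch += tonic + 12 * octave
--
--         # get pitch of all other stacked 3rds
--         else:
--
--             # case with major third
--             if symbl == "+":
--                 pitch = pitchSet[-1] + MAJORDTHIRD
--
--             # case with minor triad
--             elif symbl == "-":
--                 pitch = pitchSet[-1] + MINORTHIRD
--             else:
--                 raise ValueError("%s is not supported as a stacked 3rd" %
--                                  symbl)
--         if pitch != None:
--             pitchSet.append(pitch)
--
--     return pitchSet
-- ===== SOURCE B (Python) =====
-- MAJORDTHIRD = 4
--
-- MINORTHIRD = 3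
--
-- _DELTA = {"+": MAJORDTHIRD, "-": MINORTHIRD}
--
-- def fromCodeToPitchSet(code, tonic=0, octave=0):
--     """Converts a chord code into a pitch set (closed-form re-implementation)."""
--     if not code:
--         return []
--     root = int(code[0], 12) + tonic + 12 * octave
--     tail = code[1:]
--     for symbl in tail:
--         if symbl not in _DELTA:
--             raise ValueError("%s is not supported as a stacked 3rd" % symbl)
--     # pitch i is root plus 3 per stacked third plus 1 extra per major third seen
--     return [root + 3 * i + tail[:i].count("+") for i in range(len(tail) + 1)]
-- ===== Notes on version B (the rewrite author's own statement) =====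
-- stated objective: alternative
-- what changed: B replaces A's single stateful loop (each pitch = pitchSet[-1] + delta) by a validate-then-closed-form comprehension: pitch i = root + 3*i + count of '+' among the first i stacked-third symbols.
import Mathlib
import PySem

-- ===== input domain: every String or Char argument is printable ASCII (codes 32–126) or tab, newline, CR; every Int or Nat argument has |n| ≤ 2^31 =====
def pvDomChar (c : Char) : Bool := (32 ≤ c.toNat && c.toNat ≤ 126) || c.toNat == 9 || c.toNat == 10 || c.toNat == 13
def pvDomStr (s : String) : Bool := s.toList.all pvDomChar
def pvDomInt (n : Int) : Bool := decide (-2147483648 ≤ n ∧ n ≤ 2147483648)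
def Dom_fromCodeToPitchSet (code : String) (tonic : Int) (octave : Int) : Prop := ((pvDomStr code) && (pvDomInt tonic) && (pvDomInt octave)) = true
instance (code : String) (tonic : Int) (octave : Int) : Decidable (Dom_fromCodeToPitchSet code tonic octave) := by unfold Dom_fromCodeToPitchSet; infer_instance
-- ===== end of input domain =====

-- B replaces A's last-element-plus-delta loop by validation plus a closed-form comprehension
-- (pitch i = root + 3*i + number of '+' among the first i stacked thirds); objective: alternative.


-- ===== PORT A =====
-- literal port of A: one fold over enumerate(code); index 0 parses the root with int(symbl, 12),
-- later indices add MAJORDTHIRD/MINORTHIRD to pitchSet[-1]. Where Python raises (ValueError on a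
-- bad character, IndexError on pitchSet[-1] of []) the port uses a default — those inputs are
-- excluded by Pre_fromCodeToPitchSet.
def fromCodeToPitchSet (code : String) (tonic : Int) (octave : Int) : List Int :=
  (PySem.List.enumerate code.toList 0).foldl
    (fun pitchSet p =>
      let pitch : Int :=
        if p.1 = 0 then
          (PySem.Int.ofCharsBase? [p.2] 12).getD 0 + tonic + 12 * octave
        else if p.2 = '+' then (PySem.List.pyGet? pitchSet (-1)).getD 0 + 4
        else if p.2 = '-' then (PySem.List.pyGet? pitchSet (-1)).getD 0 + 3
        else 0
      pitchSet ++ [pitch]) []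

-- ===== PORT B =====
-- literal port of Source B: parse root, validate the tail, then a closed-form comprehension.
-- Where Source B raises (same inputs as A) the port returns [] — excluded by Pre_fromCodeToPitchSet.
def fromCodeToPitchSet_alt (code : String) (tonic : Int) (octave : Int) : List Int :=
  match code.toList with
  | [] => []
  | c :: tail =>
    match PySem.Int.ofCharsBase? [c] 12 with
    | none => []
    | some v =>
      let root := v + tonic + 12 * octave
      if tail.all (fun s => s = '+' || s = '-') then
        (PySem.List.pyRange 0 ((tail.length : Int) + 1) 1).map
          (fun i => root + 3 * i +
            ((PySem.List.slice tail none (some i)).count '+' : Int))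
      else []

-- ===== PRECONDITION & SPEC =====
-- the characters int(c, 12) accepts as a single character
def pvRootChars : List Char := ['0','1','2','3','4','5','6','7','8','9','a','b','A','B']

-- Pre_ excludes exactly the inputs where A raises: a first character that is not a base-12 digit
-- (ValueError from int, or IndexError on a later pitchSet[-1]) or a later character other than '+'/'-'
-- (ValueError). A returns normally on every other input.
def Pre_fromCodeToPitchSet (code : String) (_tonic : Int) (_octave : Int) : Prop :=
  ∀ p ∈ PySem.List.enumerate code.toList 0,
    if p.1 = 0 then p.2 ∈ pvRootChars else (p.2 = '+' ∨ p.2 = '-')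
instance (code : String) (tonic : Int) (octave : Int) : Decidable (Pre_fromCodeToPitchSet code tonic octave) := by unfold Pre_fromCodeToPitchSet; infer_instance

def pvWitness_fromCodeToPitchSet : String × Int × Int := ("4+-+", 2, -1)

def Spec_fromCodeToPitchSet (code : String) (tonic : Int) (octave : Int) (out : List Int) : Prop := out = fromCodeToPitchSet_alt code tonic octave
instance (code : String) (tonic : Int) (octave : Int) (out : List Int) : Decidable (Spec_fromCodeToPitchSet code tonic octave out) := by unfold Spec_fromCodeToPitchSet; infer_instance

-- ===== CLAIM (what is proved, stated in full; the proofs are below) =====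
def Claim_equal_fromCodeToPitchSet : Prop := ∀ (code : String) (tonic : Int) (octave : Int), Dom_fromCodeToPitchSet code tonic octave → Pre_fromCodeToPitchSet code tonic octave → Spec_fromCodeToPitchSet code tonic octave (fromCodeToPitchSet code tonic octave)

-- ===== LEMMAS AND PROOFS =====

-- reference shape of the non-root pitches: each adds 4 for '+', 3 otherwise, to the running pitch
def pvTailPitches (r : Int) : List Char → List Int
  | [] => []
  | s :: rest =>
    (r + (if s = '+' then 4 else 3)) :: pvTailPitches (r + (if s = '+' then 4 else 3)) rest

theorem pvRoot_isSome {c : Char} (h : c ∈ pvRootChars) :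
    (PySem.Int.ofCharsBase? [c] 12).isSome := by
  fin_cases h <;> decide

-- A's fold from index ≥ 1 onward appends pvTailPitches of the last pitch
theorem pvFoldA (tonic octave : Int) (tail : List Char) :
    ∀ (ps : List Int) (r : Int) (n : Int), 1 ≤ n → ps.getLast? = some r →
    (∀ s ∈ tail, s = '+' ∨ s = '-') →
    (PySem.List.enumerate tail n).foldl
      (fun pitchSet p =>
        let pitch : Int :=
          if p.1 = 0 then
            (PySem.Int.ofCharsBase? [p.2] 12).getD 0 + tonic + 12 * octave
          else if p.2 = '+' then (PySem.List.pyGet? pitchSet (-1)).getD 0 + 4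
          else if p.2 = '-' then (PySem.List.pyGet? pitchSet (-1)).getD 0 + 3
          else 0
        pitchSet ++ [pitch]) ps = ps ++ pvTailPitches r tail := by
  induction tail with
  | nil => intro ps r n _ _ _; simp [PySem.List.enumerate_nil, pvTailPitches]
  | cons s rest ih =>
    intro ps r n hn hlast hval
    have hn0 : ¬ ((n, s).1 = (0 : Int)) := by simp; omega
    have hget : PySem.List.pyGet? ps (-1) = some r := by
      rw [PySem.List.pyGet?_neg_one, hlast]
    rw [PySem.List.enumerate_cons, List.foldl_cons]
    rcases hval s (by simp) with hs | hs <;>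
    · rw [ih _ (r + (if s = '+' then 4 else 3)) (n + 1) (by omega)
        (by simp [hs, hn0, hget]) (fun x hx => hval x (by simp [hx]))]
      simp [hs, hn0, hget, pvTailPitches, List.append_assoc]

-- B's comprehension, phrased over List.range, equals the same reference shape
theorem pvMapBRange (tail : List Char) :
    ∀ root : Int,
    (List.range (tail.length + 1)).map
      (fun k : Nat => root + 3 * (k : Int) + ((tail.take k).count '+' : Int))
      = root :: pvTailPitches root tail := by
  induction tail with
  | nil => intro root; simp [pvTailPitches]
  | cons s rest ih =>
    intro root
    rw [show (s :: rest).length + 1 = rest.length + 1 + 1 from rfl,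
      List.range_succ_eq_map, List.map_cons, List.map_map]
    have hcomp :
        ((fun k : Nat => root + 3 * (k : Int) + (((s :: rest).take k).count '+' : Int)) ∘ Nat.succ)
        = fun k : Nat => (root + (if s = '+' then 4 else 3)) + 3 * (k : Int) +
            ((rest.take k).count '+' : Int) := by
      funext k
      simp only [Function.comp_apply, List.take_succ_cons, List.count_cons]
      by_cases hs : s = '+' <;> simp [hs] <;> ring
    rw [hcomp, ih (root + (if s = '+' then 4 else 3))]
    simp [pvTailPitches]

-- B's actual comprehension (pyRange + slice) equals the List.range phrasing
theorem pvMapB (tail : List Char) (root : Int) :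
    (PySem.List.pyRange 0 ((tail.length : Int) + 1) 1).map
      (fun i => root + 3 * i + ((PySem.List.slice tail none (some i)).count '+' : Int))
      = root :: pvTailPitches root tail := by
  rw [PySem.List.pyRange_one, List.map_map, ← pvMapBRange tail root]
  have hlen : (((tail.length : Int) + 1 - 0)).toNat = tail.length + 1 := by omega
  rw [hlen]
  refine List.map_congr_left ?_
  intro k _
  simp only [Function.comp_apply, zero_add, PySem.List.slice_to_natCast]

-- ===== VERDICT (by name: the statement is the Claim_ definition above) =====
theorem fromCodeToPitchSet_spec : Claim_equal_fromCodeToPitchSet := by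
  intro code tonic octave _ hpre
  unfold Spec_fromCodeToPitchSet
  unfold Pre_fromCodeToPitchSet at hpre
  rcases hcs : code.toList with _ | ⟨c, tail⟩
  · simp [fromCodeToPitchSet, fromCodeToPitchSet_alt, hcs, PySem.List.enumerate_nil]
  · rw [hcs] at hpre
    have hc : c ∈ pvRootChars := by
      have := hpre (0, c) (by rw [PySem.List.enumerate_cons]; simp)
      simpa using this
    have hval : ∀ s ∈ tail, s = '+' ∨ s = '-' := by
      intro s hs
      obtain ⟨k, hk, rfl⟩ := List.mem_iff_getElem.mp hs
      have hmem : ((1 : Int) + k, tail[k]) ∈ PySem.List.enumerate (c :: tail) 0 := by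
        rw [PySem.List.enumerate_cons]
        exact List.mem_cons_of_mem _
          ((PySem.List.mem_enumerate_iff _ _ _).mpr ⟨k, hk, rfl⟩)
      have := hpre _ hmem
      have hne : ¬ (((1 : Int) + k, tail[k]).1 = 0) := by simp; omega
      simpa [hne] using this
    obtain ⟨v, hv⟩ := Option.isSome_iff_exists.mp (pvRoot_isSome hc)
    have hall : tail.all (fun s => s = '+' || s = '-') = true := by
      rw [List.all_eq_true]; intro s hs
      rcases hval s hs with h | h <;> simp [h]
    -- A side: first step parses the root, the rest is pvFoldA
    rw [fromCodeToPitchSet, hcs, PySem.List.enumerate_cons, List.foldl_cons]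
    rw [pvFoldA tonic octave tail _ (v + tonic + 12 * octave) (0 + 1)
        (by norm_num) (by simp [hv]) hval]
    -- B side
    simp only [fromCodeToPitchSet_alt, hcs, hv, hall, if_true]
    rw [pvMapB]
    simp
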